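-- pv_equiv track=rewrite | github.com/nhimzu123/Big-O-Blue | 08_16_21_Dynamic_Array_String/ex8.py | need_tree
-- ===== SOURCE A (Python) =====
-- def need_tree(string_a, string_b):
--     dict_a = {key: string_a.count(key) for key in string_a}
--     dict_b = {key: string_b.count(key) for key in string_b}
--
--     for key in dict_b.keys():
--         if key not in dict_a.keys():
--             return True
--         if dict_b[key] > dict_a[key]:
--             return True
--     return False
-- ===== SOURCE B (Python) =====
-- def need_tree(string_a, string_b):
--     budget = {}
--     for c in string_a:
--         budget[c] = budget.get(c, 0) + 1
--     for c in string_b: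
--         rem = budget.get(c, 0) - 1
--         budget[c] = rem
--         if rem < 0:
--             return True
--     return False
-- ===== Notes on version B (the rewrite author's own statement) =====
-- stated objective: faster
-- what changed: Replaces two full count tables built with repeated str.count (a quadratic pass per string) and a post-hoc comparison of the finished tables by a single frequency dict for string_a and a streaming consume-the-budget loop over string_b that early-exits the moment a character's budget underflows.
import Mathlib
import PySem

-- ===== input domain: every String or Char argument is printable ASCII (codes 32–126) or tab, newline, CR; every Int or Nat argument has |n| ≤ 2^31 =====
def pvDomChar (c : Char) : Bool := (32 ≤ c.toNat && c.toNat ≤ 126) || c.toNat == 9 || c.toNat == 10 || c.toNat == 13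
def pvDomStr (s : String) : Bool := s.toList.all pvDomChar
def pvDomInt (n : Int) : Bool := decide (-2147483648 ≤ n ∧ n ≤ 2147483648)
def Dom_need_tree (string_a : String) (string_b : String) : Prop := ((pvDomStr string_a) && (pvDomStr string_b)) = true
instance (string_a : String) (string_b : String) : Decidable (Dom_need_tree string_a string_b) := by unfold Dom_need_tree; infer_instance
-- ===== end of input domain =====

-- B replaces A's two repeated-str.count tables and post-hoc comparison by one frequency
-- dict for string_a and a streaming budget-decrement loop over string_b with an early exit.


-- ===== PORT A =====
-- the 'for key in dict_b.keys(): …' loop with its two early returns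
-- (dict_a[key]/dict_b[key] are always present where read — key ∈ dict_b.keys(), and
-- dict_a[key] is only read after 'key not in dict_a' returned — so getD is exact here)
def needLoopA (da db : PySem.Dict Char Int) : List Char → Bool
  | [] => false
  | k :: rest =>
    if !(da.contains k) then true
    else if db.getD k 0 > da.getD k 0 then true
    else needLoopA da db rest

-- {key: s.count(key) for key in s}  (str.count of the 1-char string made of key)
def countDict (s : String) : PySem.Dict Char Int :=
  s.toList.foldl (fun d k => d.insert k ((PySem.Str.count s (String.mk [k]) : Int))) PySem.Dict.empty

def need_tree (string_a : String) (string_b : String) : Bool :=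
  let dict_a := countDict string_a
  let dict_b := countDict string_b
  needLoopA dict_a dict_b dict_b.keys

-- ===== PORT B =====
-- for c in string_b: rem = budget.get(c,0) - 1; budget[c] = rem; if rem < 0: return True
def needLoopB (budget : PySem.Dict Char Int) : List Char → Bool
  | [] => false
  | c :: rest =>
    let rem := budget.getD c 0 - 1
    let budget' := budget.insert c rem
    if rem < 0 then true else needLoopB budget' rest

def need_tree_alt (string_a : String) (string_b : String) : Bool :=
  let budget := string_a.toList.foldl (fun d c => d.insert c (d.getD c 0 + 1)) PySem.Dict.empty
  needLoopB budget string_b.toList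

-- ===== PRECONDITION & SPEC =====
def Spec_need_tree (string_a : String) (string_b : String) (out : Bool) : Prop := out = need_tree_alt string_a string_b
instance (string_a : String) (string_b : String) (out : Bool) : Decidable (Spec_need_tree string_a string_b out) := by unfold Spec_need_tree; infer_instance

-- ===== CLAIM (what is proved, stated in full; the proofs are below) =====
def Claim_equal_need_tree : Prop := ∀ (string_a : String) (string_b : String), Dom_need_tree string_a string_b → Spec_need_tree string_a string_b (need_tree string_a string_b)

-- ===== LEMMAS AND PROOFS =====

-- str.count's fuelled scanner, specialised to a one-character needle
lemma count_go_singleton (c : Char) : ∀ (fuel : Nat) (l : List Char) (acc : Nat),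
    l.length ≤ fuel → PySem.Chars.count.go [c] fuel l acc = acc + l.count c := by
  intro fuel
  induction fuel with
  | zero =>
    intro l acc h
    cases l with
    | nil => simp [PySem.Chars.count.go]
    | cons x t => simp at h
  | succ n ih =>
    intro l acc h
    cases l with
    | nil => simp [PySem.Chars.count.go]
    | cons x t =>
      simp only [PySem.Chars.count.go, List.isPrefixOf, List.drop, List.length] at *
      by_cases hx : c = x
      · subst hx
        simp only [BEq.rfl, Bool.true_and, List.isPrefixOf, if_pos] at *
        rw [ih t (acc+1) (by omega)]
        simp
        omega
      · have : (c == x) = false := by simp [hx]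
        simp [this, List.count_cons, ih t acc (by omega), Ne.symm hx]

-- str.count of a one-character needle is the character count
lemma str_count_singleton (s : String) (c : Char) :
    PySem.Str.count s (String.mk [c]) = s.toList.count c := by
  have hmk : (String.mk [c]).toList = [c] := (String.ofList_eq.mp rfl).symm
  rw [PySem.Str.count_eq, hmk, PySem.Chars.count]
  simp only [List.isEmpty_cons, if_neg Bool.false_ne_true]
  rw [count_go_singleton c s.toList.length s.toList 0 le_rfl]
  simp

-- lookup in a dict built by inserting f k for each k of a list
lemma get?_foldl_insert (f : Char → Int) :
    ∀ (l : List Char) (d : PySem.Dict Char Int) (x : Char),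
    (l.foldl (fun d k => d.insert k (f k)) d).get? x
      = if x ∈ l then some (f x) else d.get? x := by
  intro l
  induction l with
  | nil => simp
  | cons c rest ih =>
    intro d x
    simp only [List.foldl_cons, ih, PySem.Dict.get?_insert, List.mem_cons]
    by_cases h1 : x ∈ rest <;> by_cases h2 : x = c <;> simp [h1, h2]

lemma get?_countDict (s : String) (x : Char) :
    (countDict s).get? x = if x ∈ s.toList then some ((s.toList.count x : Int)) else none := by
  rw [countDict, get?_foldl_insert, str_count_singleton, PySem.Dict.get?_empty]

lemma contains_countDict (s : String) (x : Char) :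
    (countDict s).contains x = decide (x ∈ s.toList) := by
  rw [PySem.Dict.contains_eq_isSome_get?, get?_countDict]
  by_cases h : x ∈ s.toList <;> simp [h]

lemma mem_keys_countDict (s : String) (x : Char) :
    x ∈ (countDict s).keys ↔ x ∈ s.toList := by
  rw [← PySem.Dict.contains_iff_mem_keys, ← decide_eq_true_iff (p := x ∈ s.toList), contains_countDict]

lemma getD_countDict (s : String) (x : Char) (hx : x ∈ s.toList) :
    (countDict s).getD x 0 = (s.toList.count x : Int) := by
  rw [PySem.Dict.getD_eq_get?_getD, get?_countDict, if_pos hx, Option.getD_some]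

-- A's key loop is an early-exit 'any' over the keys
lemma needLoopA_any (da db : PySem.Dict Char Int) (l : List Char) :
    needLoopA da db l = l.any (fun k => !(da.contains k) || decide (db.getD k 0 > da.getD k 0)) := by
  induction l with
  | nil => rfl
  | cons k rest ih =>
    rw [needLoopA, List.any_cons, ih]
    by_cases h1 : da.contains k <;> by_cases h2 : db.getD k 0 > da.getD k 0 <;> simp [h1, h2]

-- B's streaming loop fires iff some character's budget is below its count in the stream
lemma needLoopB_iff (l : List Char) : ∀ (d : PySem.Dict Char Int),
    needLoopB d l = true ↔ ∃ c ∈ l, d.getD c 0 < (l.count c : Int) := by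
  induction l with
  | nil => simp [needLoopB]
  | cons c rest ih =>
    intro d
    rw [needLoopB]
    by_cases hneg : d.getD c 0 - 1 < 0
    · simp only [if_pos hneg, true_iff]
      refine ⟨c, List.mem_cons_self, ?_⟩
      have : (0:Int) ≤ (rest.count c : Int) := Int.natCast_nonneg _
      simp [List.count_cons_self]
      push_cast
      omega
    · simp only [if_neg hneg, ih]
      constructor
      · rintro ⟨x, hx, hlt⟩
        rw [PySem.Dict.getD_insert] at hlt
        by_cases hxc : x = c
        · subst hxc
          refine ⟨x, List.mem_cons_self, ?_⟩
          simp only [if_pos rfl] at hlt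
          simp [List.count_cons_self]; push_cast; omega
        · refine ⟨x, List.mem_cons_of_mem _ hx, ?_⟩
          simp only [if_neg hxc] at hlt
          rw [List.count_cons_of_ne (fun h => hxc h.symm)]
          exact hlt
      · rintro ⟨x, hx, hlt⟩
        by_cases hxc : x = c
        · subst hxc
          rw [List.count_cons_self] at hlt
          have hmem : x ∈ rest := by
            by_contra hnm
            have : rest.count x = 0 := List.count_eq_zero.mpr hnm
            rw [this] at hlt
            omega
          refine ⟨x, hmem, ?_⟩
          rw [PySem.Dict.getD_insert, if_pos rfl]
          push_cast at hlt ⊢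
          omega
        · rcases List.mem_cons.mp hx with h | h
          · exact absurd h hxc
          · refine ⟨x, h, ?_⟩
            rw [PySem.Dict.getD_insert, if_neg hxc]
            rw [List.count_cons_of_ne (fun h => hxc h.symm)] at hlt
            exact hlt

lemma need_tree_iff (a b : String) :
    need_tree a b = true ↔ ∃ k ∈ b.toList, (a.toList.count k : Int) < (b.toList.count k : Int) := by
  rw [need_tree]
  simp only [needLoopA_any, List.any_eq_true]
  constructor
  · rintro ⟨k, hk, hp⟩
    have hkb : k ∈ b.toList := (mem_keys_countDict b k).mp hk
    refine ⟨k, hkb, ?_⟩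
    rw [Bool.or_eq_true, Bool.not_eq_true', contains_countDict, decide_eq_false_iff_not] at hp
    rcases hp with hka | hlt
    · have : a.toList.count k = 0 := List.count_eq_zero.mpr hka
      have hpos : 0 < b.toList.count k := List.count_pos_iff.mpr hkb
      rw [this]
      exact_mod_cast hpos
    · rw [decide_eq_true_iff, getD_countDict b k hkb] at hlt
      by_cases hka : k ∈ a.toList
      · rwa [getD_countDict a k hka] at hlt
      · have : a.toList.count k = 0 := List.count_eq_zero.mpr hka
        rw [this]
        exact_mod_cast List.count_pos_iff.mpr hkb
  · rintro ⟨k, hk, hlt⟩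
    refine ⟨k, (mem_keys_countDict b k).mpr hk, ?_⟩
    rw [Bool.or_eq_true, Bool.not_eq_true', contains_countDict]
    by_cases hka : k ∈ a.toList
    · right
      rw [decide_eq_true_iff, getD_countDict b k hk, getD_countDict a k hka]
      exact hlt
    · left
      simp [hka]

lemma need_tree_alt_iff (a b : String) :
    need_tree_alt a b = true ↔ ∃ k ∈ b.toList, (a.toList.count k : Int) < (b.toList.count k : Int) := by
  rw [need_tree_alt]
  rw [needLoopB_iff]
  refine exists_congr fun k => and_congr_right fun hk => ?_
  rw [PySem.Dict.getD_foldl_insert_add_one, PySem.Dict.getD_empty]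
  simp

-- ===== VERDICT (by name: the statement is the Claim_ definition above) =====
theorem need_tree_spec : Claim_equal_need_tree := by
  intro a b _
  unfold Spec_need_tree
  have := (need_tree_iff a b).trans (need_tree_alt_iff a b).symm
  cases h1 : need_tree a b <;> cases h2 : need_tree_alt a b <;> simp_all
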